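-- pv_equiv track=rewrite | github.com/a6987985/new-gui | work_scr/datatran_module_hist.py | module_prefixes
-- ===== SOURCE A (Python) =====
-- from typing import DefaultDict, Dict, List, Sequence, Tuple
--
-- def module_prefixes(net_name: str, max_depth: int) -> List[str]:
--     parts = [part for part in net_name.strip().split("/") if part]
--     if not parts:
--         return ["<top>"]
--
--     module_parts = parts[:-1]
--     if not module_parts:
--         return ["<top>"]
--
--     limit = min(max_depth, len(module_parts))
--     return ["/".join(module_parts[:depth]) for depth in range(1, limit + 1)]
-- ===== SOURCE B (Python) =====
-- def _prefixes(parts, limit):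
--     if not parts or limit <= 0:
--         return []
--     rest = _prefixes(parts[1:], limit - 1)
--     return [parts[0]] + [parts[0] + "/" + p for p in rest]
--
-- def module_prefixes(net_name: str, max_depth: int):
--     tokens = []
--     buf = ""
--     for ch in net_name.strip():
--         if ch == "/":
--             if buf:
--                 tokens.append(buf)
--             buf = ""
--         else:
--             buf += ch
--     if buf:
--         tokens.append(buf)
--     if len(tokens) <= 1:
--         return ["<top>"]
--     return _prefixes(tokens[:-1], min(max_depth, len(tokens) - 1))
-- ===== Notes on version B (the rewrite author's own statement) =====
-- stated objective: alternative
-- what changed: Replaces strip/split('/')/filter plus a per-depth slice-and-rejoin comprehension by a hand-rolled single-pass character tokenizer (one length<=1 guard instead of two emptiness guards) and a structural recursion that builds the prefix list by prepending the head to every prefix of the tail.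
import Mathlib
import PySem

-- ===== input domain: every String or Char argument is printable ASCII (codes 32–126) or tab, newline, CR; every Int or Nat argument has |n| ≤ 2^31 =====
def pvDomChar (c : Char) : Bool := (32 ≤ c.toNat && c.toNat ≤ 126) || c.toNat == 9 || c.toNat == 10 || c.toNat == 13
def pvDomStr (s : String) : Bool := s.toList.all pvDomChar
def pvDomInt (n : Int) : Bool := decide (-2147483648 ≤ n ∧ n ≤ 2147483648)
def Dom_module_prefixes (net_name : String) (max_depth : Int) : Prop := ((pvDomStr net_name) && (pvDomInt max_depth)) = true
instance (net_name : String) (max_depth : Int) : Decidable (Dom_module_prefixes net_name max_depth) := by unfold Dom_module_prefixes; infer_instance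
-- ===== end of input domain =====

-- B replaces strip/split/filter + per-depth slice-and-join by a hand-rolled one-pass tokenizer,
-- a single length guard, and a structural recursion prepending the head to the tail's prefixes
-- (objective: alternative decomposition).


-- ===== PORT A =====
def module_prefixes (net_name : String) (max_depth : Int) : List String :=
  let parts := ((PySem.Str.split? (PySem.Str.strip net_name) "/").getD []).filter (fun part => part ≠ "")
  if parts = [] then ["<top>"]
  else
    let module_parts := PySem.List.slice parts none (some (-1))
    if module_parts = [] then ["<top>"]
    else
      let limit := min max_depth (module_parts.length : Int)
      (PySem.List.pyRange 1 (limit + 1) 1).map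
        (fun depth => PySem.Str.join "/" (PySem.List.slice module_parts none (some depth)))

-- ===== PORT B =====
-- Source B's for-loop tokenizer: buf collects a run of non-'/' chars, emitted when nonempty.
def altRuns (buf : List Char) : List Char → List String
  | [] => if buf = [] then [] else [String.ofList buf]
  | c :: rest =>
      if c = '/' then (if buf = [] then [] else [String.ofList buf]) ++ altRuns [] rest
      else altRuns (buf ++ [c]) rest

-- Source B's _prefixes: head, then head ++ "/" prepended to every prefix of the tail.
def altPrefixes : List String → Int → List String
  | [], _ => []
  | head :: rest, limit =>
      if limit ≤ 0 then []
      else head :: (altPrefixes rest (limit - 1)).map (fun p => head ++ "/" ++ p)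

def module_prefixes_alt (net_name : String) (max_depth : Int) : List String :=
  let tokens := altRuns [] (PySem.Str.strip net_name).toList
  if tokens.length ≤ 1 then ["<top>"]
  else altPrefixes tokens.dropLast (min max_depth ((tokens.length : Int) - 1))

-- ===== PRECONDITION & SPEC =====
def Spec_module_prefixes (net_name : String) (max_depth : Int) (out : List String) : Prop := out = module_prefixes_alt net_name max_depth
instance (net_name : String) (max_depth : Int) (out : List String) : Decidable (Spec_module_prefixes net_name max_depth out) := by unfold Spec_module_prefixes; infer_instance

-- ===== CLAIM =====
def Claim_equal_module_prefixes : Prop := ∀ (net_name : String) (max_depth : Int), Dom_module_prefixes net_name max_depth → Spec_module_prefixes net_name max_depth (module_prefixes net_name max_depth)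

-- ===== LEMMAS AND PROOFS =====

-- proof-only reference splitter: Python split('/') with an in-order (reversed) run buffer
def pvSplit : List Char → List Char → List (List Char)
  | [], cur => [cur.reverse]
  | c :: rest, cur => if c = '/' then cur.reverse :: pvSplit rest [] else pvSplit rest (c :: cur)

lemma splitOn_go_eq (fuel : Nat) :
    ∀ (l cur : List Char) (acc : List (List Char)), l.length < fuel →
      PySem.Chars.splitOn.go ['/'] fuel l cur acc = acc.reverse ++ pvSplit l cur := by
  induction fuel with
  | zero => intro l cur acc h; omega
  | succ fuel ih =>
    intro l cur acc h
    cases l with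
    | nil => simp [PySem.Chars.splitOn.go, pvSplit]
    | cons c rest =>
      by_cases hc : c = '/'
      · subst hc
        simp only [PySem.Chars.splitOn.go, List.isPrefixOf, BEq.rfl, Bool.true_and,
          if_pos, List.length_cons, List.drop_succ_cons, List.length_nil, List.drop_zero]
        rw [ih rest [] (cur.reverse :: acc) (by simpa using h)]
        simp [pvSplit]
      · have hpre : List.isPrefixOf ['/'] (c :: rest) = false := by
          simp [List.isPrefixOf]; exact fun h' => absurd h'.symm hc
        simp only [PySem.Chars.splitOn.go, hpre, Bool.false_eq_true, if_false]
        rw [ih rest (c :: cur) acc (by simpa using h)]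
        simp [pvSplit, hc]

lemma splitOn_eq_pvSplit (s : List Char) :
    PySem.Chars.splitOn s ['/'] = pvSplit s [] := by
  unfold PySem.Chars.splitOn
  rw [splitOn_go_eq (s.length + 1) s [] [] (by omega)]
  simp

-- Source B's tokenizer = Python split('/') with empty pieces dropped
set_option maxRecDepth 4000 in
lemma altRuns_eq (l : List Char) :
    ∀ buf : List Char,
      altRuns buf l = ((pvSplit l buf.reverse).filter (fun cs => cs ≠ [])).map String.ofList := by
  induction l with
  | nil =>
    intro buf
    by_cases hb : buf = [] <;> simp [altRuns, pvSplit, hb]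
  | cons c rest ih =>
    intro buf
    by_cases hc : c = '/'
    · subst hc
      have ih0 := ih []
      simp only [List.reverse_nil] at ih0
      by_cases hb : buf = [] <;>
        simp [altRuns, pvSplit, hb, ih0]
    · have ih' := ih (buf ++ [c])
      rw [show (buf ++ [c]).reverse = c :: buf.reverse by simp] at ih'
      simp [altRuns, pvSplit, hc, ih']

lemma filter_ne_empty_map_ofList (l : List (List Char)) :
    (l.map String.ofList).filter (fun s => s ≠ "") = (l.filter (fun cs => cs ≠ [])).map String.ofList := by
  induction l with
  | nil => rfl
  | cons cs t ih =>
    simp only [List.map_cons, List.filter_cons]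
    by_cases h : cs = []
    · subst h
      simpa using ih
    · have h' : String.ofList cs ≠ "" := by
        intro he
        apply h
        have := congrArg String.toList he
        simpa using this
      simpa [h, h'] using ih

-- A's normalized parts list IS Source B's token list
lemma parts_eq_tokens (s : String) :
    ((PySem.Str.split? s "/").getD []).filter (fun part => part ≠ "")
      = altRuns [] s.toList := by
  have hsplit : PySem.Str.split? s "/" = some ((PySem.Chars.splitOn s.toList ['/']).map String.ofList) := by
    simp [PySem.Str.split?, PySem.Chars.split?]
  rw [hsplit, Option.getD_some, splitOn_eq_pvSplit, filter_ne_empty_map_ofList, altRuns_eq]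
  simp

lemma str_join_singleton (x : String) : PySem.Str.join "/" [x] = x := by
  apply String.toList_inj.mp
  rw [PySem.Str.toList_join]
  simp [PySem.Chars.join_singleton]

lemma str_join_cons (x : String) (l : List String) (h : l ≠ []) :
    PySem.Str.join "/" (x :: l) = x ++ "/" ++ PySem.Str.join "/" l := by
  apply String.toList_inj.mp
  cases l with
  | nil => exact absurd rfl h
  | cons b t =>
    simp [PySem.Str.toList_join, PySem.Chars.join_cons_cons]

-- Source B's recursive prefixes = the take-and-join prefixes, for a limit within the list
lemma altPrefixes_eq (l : List String) :
    ∀ k : Nat, k ≤ l.length →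
      altPrefixes l (k : Int) = (List.range k).map (fun i => PySem.Str.join "/" (l.take (i + 1))) := by
  induction l with
  | nil =>
    intro k hk
    have hk0 : k = 0 := by simpa using hk
    subst hk0; simp [altPrefixes]
  | cons x t ih =>
    intro k hk
    cases k with
    | zero => simp [altPrefixes]
    | succ j =>
      have hj : j ≤ t.length := by simpa using hk
      have hpos : ¬ ((j + 1 : Nat) : Int) ≤ 0 := by push_cast; omega
      have hcast : ((j + 1 : Nat) : Int) - 1 = (j : Int) := by push_cast; ring
      simp only [altPrefixes, hpos, if_false, hcast, ih j hj]
      rw [List.range_succ_eq_map]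
      simp only [List.map_cons, List.map_map, List.take_succ_cons, List.take_zero,
        str_join_singleton]
      congr 1
      apply List.map_congr_left
      intro i hi
      have hi' : i < j := List.mem_range.mp hi
      have hne : t.take (i + 1) ≠ [] := by
        have ht : t ≠ [] := by
          intro he; rw [he] at hj; simp at hj; omega
        simp [List.take_eq_nil_iff, ht]
      simp [Function.comp, str_join_cons x _ hne]

lemma altPrefixes_nonpos (l : List String) (limit : Int) (h : limit ≤ 0) :
    altPrefixes l limit = [] := by
  cases l <;> simp [altPrefixes, h]

-- the whole function, A-shape = B-shape, for an arbitrary token list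
lemma main_if_eq (tokens : List String) (max_depth : Int) :
    (if tokens = [] then ["<top>"]
     else if tokens.dropLast = [] then ["<top>"]
     else (PySem.List.pyRange 1 (min max_depth (tokens.dropLast.length : Int) + 1) 1).map
            (fun depth => PySem.Str.join "/" (PySem.List.slice tokens.dropLast none (some depth))))
    = (if tokens.length ≤ 1 then ["<top>"]
       else altPrefixes tokens.dropLast (min max_depth ((tokens.length : Int) - 1))) := by
  by_cases h0 : tokens = []
  · simp [h0]
  · by_cases h1 : tokens.length = 1
    · have hd : tokens.dropLast = [] := by
        simp [List.dropLast_eq_take, h1]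
      simp [h0, hd, h1]
    · have hlen : 2 ≤ tokens.length := by
        have : tokens.length ≠ 0 := by simpa using h0
        omega
      have hd : tokens.dropLast ≠ [] := by
        have hdl : tokens.dropLast.length = tokens.length - 1 := by simp
        intro he; rw [he] at hdl; simp at hdl; omega
      have hguard : ¬ tokens.length ≤ 1 := by omega
      simp only [h0, if_false, hd, if_false, hguard]
      have hlcast : ((tokens.length : Int) - 1) = (tokens.dropLast.length : Int) := by
        rw [List.length_dropLast]; omega
      rw [hlcast]
      set l := tokens.dropLast with hl
      set limit := min max_depth (l.length : Int) with hlim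
      by_cases hneg : limit ≤ 0
      · rw [PySem.List.pyRange_one_eq_nil (by omega), altPrefixes_nonpos l limit hneg]
        simp
      · have hk : limit = ((limit.toNat : Nat) : Int) := by omega
        have hkle : limit.toNat ≤ l.length := by
          have : limit ≤ (l.length : Int) := min_le_right _ _
          omega
        rw [hk, altPrefixes_eq l limit.toNat hkle]
        rw [PySem.List.pyRange_one]
        have hT : ((limit.toNat : Int) + 1 - 1).toNat = limit.toNat := by omega
        rw [hT, List.map_map]
        apply List.map_congr_left
        intro i hi
        have hcast : (1 : Int) + i = ((i + 1 : Nat) : Int) := by push_cast; ring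
        simp only [Function.comp, hcast, PySem.List.slice_to_natCast]

-- ===== VERDICT =====
theorem module_prefixes_spec : Claim_equal_module_prefixes := by
  intro net_name max_depth _
  unfold Spec_module_prefixes module_prefixes module_prefixes_alt
  simp only [parts_eq_tokens, PySem.List.slice_to_neg_one]
  exact main_if_eq (altRuns [] (PySem.Str.strip net_name).toList) max_depth
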